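-- pv_equiv track=rewrite | github.com/AnniePawl/Anna-Interview-Prep | PYnative/StringExercises/lower_first.py | lower_first
-- ===== SOURCE A (Python) =====
-- def lower_first(str):
--   lowers = ""
--   uppers = ""
--
--   for letter in str:
--     if letter.islower():
--       lowers += letter
--     else:
--       uppers += letter
--   return lowers + uppers
-- ===== SOURCE B (Python) =====
-- def lower_first(str):
--   return ''.join(sorted(str, key=lambda c: not c.islower()))
-- ===== Notes on version B (the rewrite author's own statement) =====
-- stated objective: idiomatic
-- what changed: Replaces the explicit two-accumulator partition loop with a one-liner stable sort keyed by whether the character is not lowercase, relying on sort stability to keep each group's original order.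
import Mathlib
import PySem

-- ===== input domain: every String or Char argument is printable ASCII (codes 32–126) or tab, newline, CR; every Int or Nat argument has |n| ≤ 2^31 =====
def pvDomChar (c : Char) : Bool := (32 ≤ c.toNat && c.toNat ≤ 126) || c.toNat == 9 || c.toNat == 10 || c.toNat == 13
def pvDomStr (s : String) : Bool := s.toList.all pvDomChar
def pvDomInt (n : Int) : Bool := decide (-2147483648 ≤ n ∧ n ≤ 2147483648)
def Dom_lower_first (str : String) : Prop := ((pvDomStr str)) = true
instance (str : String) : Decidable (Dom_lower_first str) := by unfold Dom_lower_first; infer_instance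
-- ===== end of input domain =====

-- B replaces A's two-accumulator partition loop with a stable sort keyed by 'not c.islower()' (idiomatic one-liner).

-- ===== PORT A =====
def lower_first (str : String) : String :=
  let r := str.toList.foldl
    (fun (acc : List Char × List Char) letter =>
      if PySem.Chars.islower letter then (acc.1 ++ [letter], acc.2)
      else (acc.1, acc.2 ++ [letter]))
    ([], [])
  String.ofList (r.1 ++ r.2)

-- ===== PORT B =====
def lower_first_alt (str : String) : String :=
  String.ofList (PySem.List.sorted str.toList (fun c => !PySem.Chars.islower c) false)

-- ===== PRECONDITION & SPEC =====
def Spec_lower_first (str : String) (out : String) : Prop := out = lower_first_alt str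
instance (str : String) (out : String) : Decidable (Spec_lower_first str out) := by unfold Spec_lower_first; infer_instance

-- ===== CLAIM (what is proved, stated in full; the proofs are below) =====
def Claim_equal_lower_first : Prop := ∀ (str : String), Dom_lower_first str → Spec_lower_first str (lower_first str)

-- ===== LEMMAS AND PROOFS =====

-- inserting a non-lower char (key true) goes to the very end
theorem insertBy_key_true (x : Char) (ys : List Char)
    (hx : PySem.Chars.islower x = false) :
    PySem.List.insertBy (fun a b => decide ((!PySem.Chars.islower a) < (!PySem.Chars.islower b))) x ys
      = ys ++ [x] := by
  apply PySem.List.insertBy_of_forall_not_before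
  intro y _
  rw [hx]
  cases PySem.Chars.islower y <;> decide

-- inserting a lower char (key false) into (L ++ U), L all-lower, U all-non-lower: after L, before U
theorem insertBy_key_false (x : Char) (L U : List Char)
    (hx : PySem.Chars.islower x = true)
    (hL : ∀ y ∈ L, PySem.Chars.islower y = true)
    (hU : ∀ y ∈ U, PySem.Chars.islower y = false) :
    PySem.List.insertBy (fun a b => decide ((!PySem.Chars.islower a) < (!PySem.Chars.islower b))) x (L ++ U)
      = L ++ x :: U := by
  induction L with
  | nil =>
    simp only [List.nil_append]
    cases U with
    | nil => simp [PySem.List.insertBy]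
    | cons u us =>
      have hu : PySem.Chars.islower u = false := hU u (by simp)
      simp [PySem.List.insertBy, hx, hu]
  | cons a as ih =>
    have ha : PySem.Chars.islower a = true := hL a (by simp)
    have cond : (decide ((!PySem.Chars.islower x) < (!PySem.Chars.islower a))) = false := by
      rw [hx, ha]; decide
    simp only [List.cons_append, PySem.List.insertBy, cond, Bool.false_eq_true, if_false]
    rw [ih (fun y hy => hL y (List.mem_cons_of_mem a hy))]

-- the insertion-sort fold maintains the partition L ++ U
theorem sort_fold_partition (xs L U : List Char)
    (hL : ∀ y ∈ L, PySem.Chars.islower y = true)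
    (hU : ∀ y ∈ U, PySem.Chars.islower y = false) :
    xs.foldl (fun acc x =>
        PySem.List.insertBy (fun a b => decide ((!PySem.Chars.islower a) < (!PySem.Chars.islower b))) x acc)
      (L ++ U)
    = (L ++ xs.filter (fun c => PySem.Chars.islower c))
        ++ (U ++ xs.filter (fun c => !PySem.Chars.islower c)) := by
  induction xs generalizing L U with
  | nil => simp
  | cons x xs ih =>
    simp only [List.foldl_cons]
    by_cases hx : PySem.Chars.islower x = true
    · rw [insertBy_key_false x L U hx hL hU]
      have hL' : ∀ y ∈ L ++ [x], PySem.Chars.islower y = true := by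
        intro y hy
        rcases List.mem_append.mp hy with h | h
        · exact hL y h
        · simp at h; rw [h]; exact hx
      have h1 : L ++ x :: U = (L ++ [x]) ++ U := by simp
      rw [h1, ih (L ++ [x]) U hL' hU]
      simp [hx, List.append_assoc]
    · have hx' : PySem.Chars.islower x = false := by simpa using hx
      have hU' : ∀ y ∈ U ++ [x], PySem.Chars.islower y = false := by
        intro y hy
        rcases List.mem_append.mp hy with h | h
        · exact hU y h
        · simp at h; rw [h]; exact hx'
      rw [insertBy_key_true x (L ++ U) hx', List.append_assoc]
      rw [ih L (U ++ [x]) hL hU']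
      simp [hx', List.append_assoc]

-- A's two-accumulator loop computes the same partition
theorem partition_fold (xs l u : List Char) :
    xs.foldl (fun (acc : List Char × List Char) letter =>
        if PySem.Chars.islower letter then (acc.1 ++ [letter], acc.2)
        else (acc.1, acc.2 ++ [letter])) (l, u)
    = (l ++ xs.filter (fun c => PySem.Chars.islower c),
       u ++ xs.filter (fun c => !PySem.Chars.islower c)) := by
  induction xs generalizing l u with
  | nil => simp
  | cons x xs ih =>
    simp only [List.foldl_cons]
    by_cases hx : PySem.Chars.islower x = true
    · rw [if_pos hx, ih]
      simp [hx]
    · have hx' : PySem.Chars.islower x = false := by simpa using hx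
      rw [if_neg (by simp [hx']), ih]
      simp [hx']

-- ===== VERDICT (by name: the statement is the Claim_ definition above) =====
theorem lower_first_spec : Claim_equal_lower_first := by
  intro str _
  unfold Spec_lower_first lower_first lower_first_alt
  rw [PySem.List.sorted_eq_foldl_insertBy]
  have h1 := sort_fold_partition str.toList [] []
    (by intro y hy; simp at hy) (by intro y hy; simp at hy)
  simp only [List.nil_append] at h1
  rw [h1]
  have h2 := partition_fold str.toList [] []
  simp only [List.nil_append] at h2
  simp [h2]
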